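-- pv_equiv track=rewrite | github.com/k-harada/AtCoder | ABC/ABC1XX/ABC165/E.py | eval_res
-- ===== SOURCE A (Python) =====
-- def eval_res(n, ab_list):
--     eval_dict = dict()
--     for a, b in ab_list:
--         d = (a - b) % n
--         if d in eval_dict.keys():
--             return False
--         eval_dict[d] = 1
--         d = (b - a) % n
--         if d in eval_dict.keys():
--             return False
--         eval_dict[d] = 1
--     return True
-- ===== SOURCE B (Python) =====
-- def eval_res(n, ab_list):
--     vals = []
--     for a, b in ab_list:
--         vals.append((a - b) % n)
--         vals.append((b - a) % n)
--     vals.sort()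
--     return all(x < y for x, y in zip(vals, vals[1:]))
-- ===== Notes on version B (the rewrite author's own statement) =====
-- stated objective: alternative
-- what changed: Replaced A's incremental dict-membership test with early return by a sort-based duplicate check: collect all 2m residues, sort them, and verify every adjacent pair is strictly increasing.
import Mathlib
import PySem

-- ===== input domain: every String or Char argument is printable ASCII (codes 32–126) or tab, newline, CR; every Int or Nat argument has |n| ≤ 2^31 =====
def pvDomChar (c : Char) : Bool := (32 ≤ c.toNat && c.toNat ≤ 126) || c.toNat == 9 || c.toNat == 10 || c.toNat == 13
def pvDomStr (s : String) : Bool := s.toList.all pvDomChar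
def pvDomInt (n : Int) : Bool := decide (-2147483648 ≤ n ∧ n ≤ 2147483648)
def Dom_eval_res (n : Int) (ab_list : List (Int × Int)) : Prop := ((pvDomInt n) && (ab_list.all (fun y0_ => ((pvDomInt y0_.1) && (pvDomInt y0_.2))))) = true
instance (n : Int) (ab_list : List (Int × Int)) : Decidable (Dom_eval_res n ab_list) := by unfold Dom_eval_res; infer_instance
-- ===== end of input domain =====

-- B replaces A's incremental dict-membership test with early exit by a sort-based duplicate
-- check: collect all residues, sort, and require every adjacent pair strictly increasing
-- (objective: alternative).

-- ===== PORT A =====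
-- the for-loop with its two early 'return False' exits, carrying eval_dict
def evalResLoop (n : Int) : List (Int × Int) → PySem.Dict Int Int → Bool
  | [], _ => true
  | (a, b) :: rest, evalDict =>
    let d := PySem.Int.mod (a - b) n
    if evalDict.contains d then false
    else
      let evalDict := evalDict.insert d 1
      let d := PySem.Int.mod (b - a) n
      if evalDict.contains d then false
      else evalResLoop n rest (evalDict.insert d 1)

def eval_res (n : Int) (ab_list : List (Int × Int)) : Bool :=
  evalResLoop n ab_list PySem.Dict.empty

-- ===== PORT B =====
def eval_res_alt (n : Int) (ab_list : List (Int × Int)) : Bool :=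
  let vals := ab_list.foldl
    (fun acc p => acc ++ [PySem.Int.mod (p.1 - p.2) n, PySem.Int.mod (p.2 - p.1) n]) []
  let vals := PySem.List.sorted vals (fun x => x) false
  (vals.zip vals.tail).all (fun q => decide (q.1 < q.2))

-- ===== PRECONDITION & SPEC =====
-- Pre_ excludes exactly the inputs where Python's '%' raises ZeroDivisionError
-- (n = 0 with at least one pair); both A and B raise there.
def Pre_eval_res (n : Int) (ab_list : List (Int × Int)) : Prop := n ≠ 0 ∨ ab_list = []
instance (n : Int) (ab_list : List (Int × Int)) : Decidable (Pre_eval_res n ab_list) := by unfold Pre_eval_res; infer_instance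
def pvWitness_eval_res : Int × (List (Int × Int)) := (7, [(3, 1), (5, 2)])
def Spec_eval_res (n : Int) (ab_list : List (Int × Int)) (out : Bool) : Prop := out = eval_res_alt n ab_list
instance (n : Int) (ab_list : List (Int × Int)) (out : Bool) : Decidable (Spec_eval_res n ab_list out) := by unfold Spec_eval_res; infer_instance

-- ===== CLAIM (what is proved, stated in full; the proofs are below) =====
def Claim_equal_eval_res : Prop := ∀ (n : Int) (ab_list : List (Int × Int)), Dom_eval_res n ab_list → Pre_eval_res n ab_list → Spec_eval_res n ab_list (eval_res n ab_list)

-- ===== LEMMAS AND PROOFS =====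

-- the flat list of residues, as produced by B's collecting loop
def pvResidues (n : Int) (l : List (Int × Int)) : List Int :=
  l.flatMap (fun p => [PySem.Int.mod (p.1 - p.2) n, PySem.Int.mod (p.2 - p.1) n])

-- A's loop returns true exactly when the dict keys extended by the remaining residues stay distinct
theorem evalResLoop_eq (n : Int) (l : List (Int × Int)) (d : PySem.Dict Int Int)
    (hnd : d.keys.Nodup) :
    evalResLoop n l d = decide ((d.keys ++ pvResidues n l).Nodup) := by
  induction l generalizing d with
  | nil => simp [evalResLoop, pvResidues, hnd]
  | cons p rest ih =>
    obtain ⟨a, b⟩ := p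
    have hres : pvResidues n ((a, b) :: rest)
        = PySem.Int.mod (a - b) n :: PySem.Int.mod (b - a) n :: pvResidues n rest := by
      simp [pvResidues]
    set d1 := PySem.Int.mod (a - b) n with hd1
    set d2 := PySem.Int.mod (b - a) n with hd2
    rw [hres]
    rw [show evalResLoop n ((a, b) :: rest) d
        = (if d.contains d1 then false
           else if (d.insert d1 1).contains d2 then false
           else evalResLoop n rest ((d.insert d1 1).insert d2 1)) from rfl]
    by_cases h1 : d.contains d1 = true
    · have hm1 : d1 ∈ d.keys := (PySem.Dict.contains_iff_mem_keys d d1).mp h1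
      rw [if_pos h1]
      symm
      rw [decide_eq_false_iff_not]
      intro hnod
      exact (List.disjoint_of_nodup_append hnod) hm1 (by simp)
    · have h1f : d.contains d1 = false := Bool.eq_false_iff.mpr h1
      have hm1 : d1 ∉ d.keys := fun h => h1 ((PySem.Dict.contains_iff_mem_keys d d1).mpr h)
      have hk1 : (d.insert d1 1).keys = d.keys ++ [d1] :=
        PySem.Dict.keys_insert_of_not_contains d 1 h1f
      rw [if_neg (by simp [h1f])]
      by_cases h2 : (d.insert d1 1).contains d2 = true
      · have hm2 : d2 ∈ d.keys ++ [d1] := by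
          rw [← hk1]; exact (PySem.Dict.contains_iff_mem_keys _ d2).mp h2
        rw [if_pos h2]
        symm
        rw [decide_eq_false_iff_not]
        intro hnod
        simp only [List.mem_append, List.mem_singleton] at hm2
        rcases hm2 with hm2 | hm2
        · exact (List.disjoint_of_nodup_append hnod) hm2 (by simp)
        · have : (d1 :: d2 :: pvResidues n rest).Nodup := (List.nodup_append.mp hnod).2.1
          simp [hm2] at this
      · have h2f : (d.insert d1 1).contains d2 = false := Bool.eq_false_iff.mpr h2
        have hm2 : d2 ∉ d.keys ++ [d1] := by
          rw [← hk1]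
          exact fun h => h2 ((PySem.Dict.contains_iff_mem_keys _ d2).mpr h)
        have hk2 : ((d.insert d1 1).insert d2 1).keys = (d.keys ++ [d1]) ++ [d2] := by
          rw [PySem.Dict.keys_insert_of_not_contains _ 1 h2f, hk1]
        have hnd2 : ((d.insert d1 1).insert d2 1).keys.Nodup := by
          rw [hk2, List.nodup_append]
          refine ⟨?_, List.nodup_singleton _, ?_⟩
          · rw [List.nodup_append]
            refine ⟨hnd, List.nodup_singleton _, ?_⟩
            intro x hx y hy
            rw [List.mem_singleton] at hy
            subst hy
            exact fun hxd => hm1 (hxd ▸ hx)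
          · intro x hx y hy
            rw [List.mem_singleton] at hy
            subst hy
            exact fun hxd => hm2 (hxd ▸ hx)
        rw [if_neg (by simp [h2f])]
        rw [show d.keys ++ d1 :: d2 :: pvResidues n rest
            = ((d.keys ++ [d1]) ++ [d2]) ++ pvResidues n rest by simp]
        rw [ih _ hnd2, hk2]

-- on a weakly increasing list, 'all adjacent pairs strictly increasing' IS distinctness
theorem adj_lt_eq_nodup (l : List Int) (h : l.Pairwise (· ≤ ·)) :
    ((l.zip l.tail).all (fun q => decide (q.1 < q.2))) = decide l.Nodup := by
  induction l with
  | nil => simp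
  | cons x t ih =>
    cases t with
    | nil => simp
    | cons y t =>
      have hx : x ≤ y ∧ ∀ z ∈ t, x ≤ z := by
        have := List.pairwise_cons.mp h
        exact ⟨this.1 y (by simp), fun z hz => this.1 z (by simp [hz])⟩
      have ht : (y :: t).Pairwise (· ≤ ·) := (List.pairwise_cons.mp h).2
      have hy : ∀ z ∈ t, y ≤ z := fun z hz => (List.pairwise_cons.mp ht).1 z hz
      have hzip : ((x :: y :: t).zip (x :: y :: t).tail).all (fun q => decide (q.1 < q.2))
          = (decide (x < y) && ((y :: t).zip (y :: t).tail).all (fun q => decide (q.1 < q.2))) := rfl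
      rw [hzip, ih ht]
      by_cases hlt : x < y
      · have hxnot : x ∉ y :: t := by
          intro hmem
          rcases List.mem_cons.mp hmem with hxy | hxt
          · omega
          · have := hy x hxt; omega
        simp [hlt, List.nodup_cons, hxnot]
      · have hxy : x = y := le_antisymm hx.1 (by omega)
        simp [List.nodup_cons, hxy]

theorem eval_res_alt_eq (n : Int) (l : List (Int × Int)) :
    eval_res_alt n l = decide ((pvResidues n l).Nodup) := by
  unfold eval_res_alt
  rw [PySem.List.foldl_append_eq_flatMap
    (fun p => [PySem.Int.mod (p.1 - p.2) n, PySem.Int.mod (p.2 - p.1) n]) l []]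
  have hperm : (PySem.List.sorted (pvResidues n l) (fun x => x) false).Perm (pvResidues n l) :=
    PySem.List.sorted_perm _ _ _
  have hpw : (PySem.List.sorted (pvResidues n l) (fun x => x) false).Pairwise (· ≤ ·) := by
    have := PySem.List.sorted_pairwise (pvResidues n l) (fun x => x)
    exact this
  show ((PySem.List.sorted (pvResidues n l) (fun x => x) false).zip
      (PySem.List.sorted (pvResidues n l) (fun x => x) false).tail).all
      (fun q => decide (q.1 < q.2)) = _
  rw [adj_lt_eq_nodup _ hpw, decide_eq_decide]
  exact hperm.nodup_iff

-- ===== VERDICT (by name: the statement is the Claim_ definition above) =====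
theorem eval_res_spec : Claim_equal_eval_res := by
  intro n ab_list _ _
  unfold Spec_eval_res eval_res
  rw [eval_res_alt_eq, evalResLoop_eq n ab_list PySem.Dict.empty (by simp [PySem.Dict.empty, PySem.Dict.keys])]
  simp [PySem.Dict.empty, PySem.Dict.keys]
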